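-- pv_equiv track=rewrite | github.com/Mdyasir25/DynamicProgrammingCodes | patternchaser.py | patternchaser
-- ===== SOURCE A (Python) =====
-- def patternchaser(s):
--     counter = 1
--     lo1 = 0
--     hi1 = len(s) // 2 - 1
--     while hi1 - lo1 > 0:
--         n = s[lo1:hi1+1]
--         lo2 = hi1 + 1
--         hi2 = hi1 + (hi1+1 - lo1)
--         while hi2 < len(s):
--             t = s[lo2:hi2+1]
--             if n == t:
--                 return "Yes", n
--             lo2 += 1
--             hi2 += 1
--         hi1 += 1
--         lo1 += 1
--         if hi1 >= len(s) // 2: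
--             lo1 = 0
--             hi1 = len(s)//2 - counter - 1
--             counter += 1
--     return "No", "Null"
-- ===== SOURCE B (Python) =====
-- def patternchaser(s):
--     n = len(s)
--     half = n // 2
--     L = half
--     while L >= 2:
--         last = {}
--         for j in range(0, n - L + 1):
--             last[s[j:j+L]] = j
--         for i in range(0, half - L + 1):
--             if last.get(s[i:i+L], -1) >= i + L:
--                 return "Yes", s[i:i+L]
--         L -= 1
--     return "No", "Null"
-- ===== Notes on version B (the rewrite author's own statement) =====
-- stated objective: faster
-- what changed: A slides each first-half window over the rest of the string with a nested compare loop; B instead, for each candidate length from half down to 2, builds a hash table mapping every substring of that length to its largest start index in one pass, then scans the first-half starts and answers each query by comparing that recorded largest start against the position just past the window.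
import Mathlib
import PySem

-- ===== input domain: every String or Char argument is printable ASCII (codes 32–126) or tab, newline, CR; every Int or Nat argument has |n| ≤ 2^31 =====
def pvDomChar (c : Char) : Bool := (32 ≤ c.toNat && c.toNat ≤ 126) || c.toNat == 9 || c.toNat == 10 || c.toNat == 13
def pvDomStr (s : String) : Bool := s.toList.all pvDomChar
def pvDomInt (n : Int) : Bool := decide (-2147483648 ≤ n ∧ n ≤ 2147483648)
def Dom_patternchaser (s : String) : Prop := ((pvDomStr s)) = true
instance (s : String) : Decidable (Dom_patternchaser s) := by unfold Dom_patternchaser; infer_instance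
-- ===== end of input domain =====

-- B replaces A's per-window slide-and-compare inner scan by a per-length table of last
-- occurrence indices built in one pass and consulted in a separate positional pass (objective: faster).

-- ===== PORT A =====
-- inner 'while hi2 < len(s)' loop of A: slides a window over the rest of s looking for a copy of nstr
def pcInnerA (s : String) (nstr : String) (lo2 hi2 : Int) : Bool :=
  if h : hi2 < PySem.Str.len s then
    let t := PySem.Str.slice s (some lo2) (some (hi2 + 1))
    if nstr == t then true
    else pcInnerA s nstr (lo2 + 1) (hi2 + 1)
  else false
termination_by (PySem.Str.len s - hi2).toNat
decreasing_by omega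

-- outer 'while hi1 - lo1 > 0' loop of A; the fuel only makes the recursion total
-- (the lemmas below prove the supplied fuel is never exhausted)
def pcOuterA (s : String) : Nat → Int → Int → Int → String × String
  | 0, _, _, _ => ("No", "Null")
  | fuel + 1, counter, lo1, hi1 =>
    if hi1 - lo1 > 0 then
      let nstr := PySem.Str.slice s (some lo1) (some (hi1 + 1))
      if pcInnerA s nstr (hi1 + 1) (hi1 + (hi1 + 1 - lo1)) then ("Yes", nstr)
      else
        let hi1' := hi1 + 1
        let lo1' := lo1 + 1
        if hi1' ≥ PySem.Int.floordiv (PySem.Str.len s) 2 then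
          pcOuterA s fuel (counter + 1) 0 (PySem.Int.floordiv (PySem.Str.len s) 2 - counter - 1)
        else
          pcOuterA s fuel counter lo1' hi1'
    else ("No", "Null")

def patternchaser (s : String) : String × String :=
  pcOuterA s (((PySem.Str.len s).toNat + 2) ^ 2) 1 0 (PySem.Int.floordiv (PySem.Str.len s) 2 - 1)

-- ===== PORT B =====
-- Source B works on s with nonnegative indices only; s[j:j+L] is ported as (toList.drop j).take L (exact
-- for 0 ≤ j) and the loop counters, all nonnegative, are carried as Nat.
-- 'last[s[j:j+L]] = j' over j in range(0, n-L+1): the per-length table of LAST occurrence starts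
def bBuild (t : List Char) (n L : Nat) : PySem.Dict (List Char) Int :=
  (List.range (n - L + 1)).foldl (fun d j => d.insert ((t.drop j).take L) (j : Int)) PySem.Dict.empty

-- 'for i in range(0, half-L+1): if last.get(s[i:i+L], -1) >= i+L: return' — first hit of the scan
def bScan (t : List Char) (half L : Nat) (last : PySem.Dict (List Char) Int) : Option Nat :=
  (List.range (half - L + 1)).find? (fun i => decide ((i : Int) + L ≤ last.getD ((t.drop i).take L) (-1)))

-- 'L = half; while L >= 2: ...; L -= 1'
def bLoop (t : List Char) (n : Nat) : Nat → String × String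
  | 0 => ("No", "Null")
  | 1 => ("No", "Null")
  | l + 2 =>
    match bScan t (n / 2) (l + 2) (bBuild t n (l + 2)) with
    | some i => ("Yes", String.ofList ((t.drop i).take (l + 2)))
    | none => bLoop t n (l + 1)

def patternchaser_alt (s : String) : String × String :=
  bLoop s.toList s.toList.length (s.toList.length / 2)

-- ===== PRECONDITION & SPEC =====
def Spec_patternchaser (s : String) (out : String × String) : Prop := out = patternchaser_alt s
instance (s : String) (out : String × String) : Decidable (Spec_patternchaser s out) := by unfold Spec_patternchaser; infer_instance

-- ===== CLAIM (what is proved, stated in full; the proofs are below) =====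
def Claim_equal_patternchaser : Prop := ∀ (s : String), Dom_patternchaser s → Spec_patternchaser s (patternchaser s)

-- ===== LEMMAS AND PROOFS =====

def pKey (t : List Char) (L i : Nat) : List Char := (t.drop i).take L

def pGood (t : List Char) (L i : Nat) : Bool :=
  decide (∃ j < t.length + 1, i + L ≤ j ∧ j + L ≤ t.length ∧ pKey t L j = pKey t L i)
lemma pGood_iff (t : List Char) (L i : Nat) :
    pGood t L i = true ↔ ∃ j : Nat, i + L ≤ j ∧ j + L ≤ t.length ∧ pKey t L j = pKey t L i := by
  simp only [pGood, decide_eq_true_eq]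
  constructor
  · rintro ⟨j, _, h⟩; exact ⟨j, h⟩
  · rintro ⟨j, h1, h2, h3⟩; exact ⟨j, by omega, h1, h2, h3⟩

def rows' (H L i : Nat) : List (Nat × Nat) := (List.range' i (H - L + 1 - i)).map (fun i' => (L, i'))
def allPairs (H : Nat) : Nat → List (Nat × Nat)
  | 0 => []
  | 1 => []
  | l + 2 => rows' H (l + 2) 0 ++ allPairs H (l + 1)
def specRes (t : List Char) (ps : List (Nat × Nat)) : String × String :=
  match ps.find? (fun p => pGood t p.1 p.2) with
  | some p => ("Yes", String.ofList (pKey t p.1 p.2))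
  | none => ("No", "Null")

lemma allPairs_unfold (H L : Nat) (hL : 2 ≤ L) :
    allPairs H L = rows' H L 0 ++ allPairs H (L - 1) := by
  obtain ⟨l, rfl⟩ : ∃ l, L = l + 2 := ⟨L - 2, by omega⟩
  rfl

lemma sliceA (s : String) (a b : Int) (i L : Nat) (ha : a = i) (hb : b = i + L) :
    PySem.Str.slice s (some a) (some b) = String.ofList (pKey s.toList L i) := by
  subst ha hb
  apply String.toList_inj.mp
  simp [PySem.Str.toList_slice, PySem.Chars.slice_eq_listSlice, PySem.List.slice_natCast_add, pKey]

lemma innerA (s : String) (L : Nat) (nstr : String) :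
    ∀ (m lo2 : Nat), s.toList.length + 1 ≤ lo2 + L + m →
      (pcInnerA s nstr (lo2 : Int) ((lo2 : Int) + L - 1) = true ↔
        ∃ j : Nat, lo2 ≤ j ∧ j + L ≤ s.toList.length ∧ String.ofList (pKey s.toList L j) = nstr) := by
  intro m
  induction m with
  | zero =>
    intro lo2 hm
    rw [pcInnerA, PySem.Str.len_eq]
    rw [dif_neg (by omega : ¬ ((lo2 : Int) + L - 1 < (s.toList.length : Int)))]
    constructor
    · intro h; exact absurd h (by simp)
    · rintro ⟨j, h1, h2, h3⟩; omega
  | succ m ih =>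
    intro lo2 hm
    rw [pcInnerA, PySem.Str.len_eq]
    by_cases hg : ((lo2 : Int) + L - 1 < (s.toList.length : Int))
    · have hfit : lo2 + L ≤ s.toList.length := by omega
      rw [dif_pos hg]
      simp only []
      rw [show ((lo2 : Int) + L - 1 + 1) = (lo2 : Int) + L from by ring]
      rw [sliceA s _ _ lo2 L rfl rfl]
      by_cases he : nstr = String.ofList (pKey s.toList L lo2)
      · simp only [he, beq_self_eq_true, if_true]
        constructor
        · intro _; exact ⟨lo2, le_refl _, hfit, rfl⟩
        · intro _; trivial
      · rw [if_neg (by simpa using he)]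
        rw [show ((lo2 : Int) + 1) = ((lo2 + 1 : Nat) : Int) from by push_cast; ring,
            show ((lo2 : Int) + L) = ((lo2 + 1 : Nat) : Int) + L - 1 from by push_cast; ring]
        rw [ih (lo2 + 1) (by omega)]
        constructor
        · rintro ⟨j, h1, h2, h3⟩; exact ⟨j, by omega, h2, h3⟩
        · rintro ⟨j, h1, h2, h3⟩
          refine ⟨j, ?_, h2, h3⟩
          rcases Nat.lt_or_ge lo2 j with h | h
          · omega
          · exfalso
            have hj : j = lo2 := by omega
            subst hj
            exact he h3.symm
    · rw [dif_neg hg]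
      constructor
      · intro h; exact absurd h (by simp)
      · rintro ⟨j, h1, h2, h3⟩; omega

def Bnd (H L i : Nat) : Nat := (H + 1 - i - L) + (L - 1) * (H + 2)
lemma rows'_cons (H L i : Nat) (h : i + L ≤ H) :
    rows' H L i = (L, i) :: rows' H L (i + 1) := by
  unfold rows'
  rw [show H - L + 1 - i = (H - L + 1 - (i + 1)) + 1 by omega, List.range'_succ]
  simp
lemma rows'_nil (H L i : Nat) (h : H - L + 1 ≤ i) : rows' H L i = [] := by
  unfold rows'
  rw [show H - L + 1 - i = 0 by omega]
  simp

lemma specRes_cons (t : List Char) (L i : Nat) (rest : List (Nat × Nat)) :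
    specRes t ((L, i) :: rest)
      = if pGood t L i then ("Yes", String.ofList (pKey t L i)) else specRes t rest := by
  unfold specRes
  rw [List.find?_cons]
  cases h : pGood t L i
  · simp
  · simp

lemma innerEqGood (s : String) (L i : Nat) (hL : 1 ≤ L) :
    pcInnerA s (String.ofList (pKey s.toList L i)) ((i + L : Nat) : Int) (((i + L : Nat) : Int) + L - 1)
      = pGood s.toList L i := by
  apply Bool.coe_iff_coe.mp
  rw [innerA s L _ s.toList.length (i + L) (by omega), pGood_iff]
  constructor
  · rintro ⟨j, a, b, c⟩
    refine ⟨j, a, b, ?_⟩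
    have := congrArg String.toList c
    simpa using this
  · rintro ⟨j, a, b, c⟩
    exact ⟨j, a, b, congrArg String.ofList c⟩

lemma outerA (s : String) :
    ∀ (fuel L i : Nat), 2 ≤ L → L ≤ s.toList.length / 2 → i + L ≤ s.toList.length / 2 →
      Bnd (s.toList.length / 2) L i ≤ fuel →
      pcOuterA s fuel (((s.toList.length / 2 : Nat) : Int) - (L : Int) + 1) (i : Int) ((i : Int) + L - 1)
        = specRes s.toList (rows' (s.toList.length / 2) L i ++ allPairs (s.toList.length / 2) (L - 1)) := by
  intro fuel
  induction fuel with
  | zero =>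
    intro L i h2 hLH hiL hB
    exfalso
    unfold Bnd at hB
    set K := (L - 1) * (s.toList.length / 2 + 2) with hK
    omega
  | succ fuel ih =>
    intro L i h2 hLH hiL hB
    have hfd : PySem.Int.floordiv (PySem.Str.len s) 2 = ((s.toList.length / 2 : Nat) : Int) := by
      rw [PySem.Str.len_eq]
      exact_mod_cast PySem.Int.floordiv_natCast s.toList.length 2
    rw [pcOuterA]
    rw [if_pos (by omega : ((i : Int) + L - 1 - i > 0))]
    simp only []
    rw [sliceA s _ _ i L rfl (by omega)]
    rw [show ((i : Int) + L - 1 + 1) = ((i + L : Nat) : Int) from by omega]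
    rw [show ((i : Int) + L - 1 + (((i + L : Nat) : Int) - i)) = ((i + L : Nat) : Int) + L - 1 from by omega]
    rw [innerEqGood s L i (by omega)]
    rw [rows'_cons _ _ _ hiL, List.cons_append, specRes_cons]
    cases hP : pGood s.toList L i with
    | true => simp only [if_true]
    | false =>
      simp only [if_false, Bool.false_eq_true]
      rw [hfd]
      by_cases hreset : i + L = s.toList.length / 2
      · rw [if_pos (by omega : ((i + L : Nat) : Int) ≥ ((s.toList.length / 2 : Nat) : Int))]
        rw [rows'_nil _ _ _ (by omega), List.nil_append]
        by_cases hL3 : 3 ≤ L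
        · have hIH := ih (L - 1) 0 (by omega) (by omega) (by omega) (by
            unfold Bnd at hB ⊢
            rw [show L - 1 - 1 = L - 2 from by omega]
            have hm : (L - 1) * (s.toList.length / 2 + 2)
                = (L - 2) * (s.toList.length / 2 + 2) + (s.toList.length / 2 + 2) := by
              conv_lhs => rw [show L - 1 = (L - 2) + 1 from by omega]
              rw [Nat.succ_mul]
            set K := (L - 2) * (s.toList.length / 2 + 2) with hK
            omega)
          rw [Nat.cast_zero] at hIH
          rw [show (((s.toList.length / 2 : Nat) : Int) - ↑L + 1 + 1)
                = ((s.toList.length / 2 : Nat) : Int) - ((L - 1 : Nat) : Int) + 1 from by omega,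
              show (((s.toList.length / 2 : Nat) : Int) - (((s.toList.length / 2 : Nat) : Int) - ↑L + 1) - 1)
                = (0 : Int) + ((L - 1 : Nat) : Int) - 1 from by omega]
          rw [allPairs_unfold _ _ (by omega : 2 ≤ L - 1)]
          exact hIH
        · have hL2 : L = 2 := by omega
          subst hL2
          unfold Bnd at hB
          match fuel, (by omega : 1 ≤ fuel) with
          | f + 1, _ =>
            rw [pcOuterA]
            rw [if_neg (by omega)]
            rfl
      · rw [if_neg (by omega : ¬ (((i + L : Nat) : Int) ≥ ((s.toList.length / 2 : Nat) : Int)))]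
        rw [show ((i : Int) + 1) = ((i + 1 : Nat) : Int) from by omega,
            show ((i + L : Nat) : Int) = ((i + 1 : Nat) : Int) + L - 1 from by omega]
        exact ih L (i + 1) h2 hLH (by omega) (by unfold Bnd at hB ⊢; set K := (L - 1) * (s.toList.length / 2 + 2) with hK; omega)

lemma topA (s : String) :
    patternchaser s = specRes s.toList (allPairs (s.toList.length / 2) (s.toList.length / 2)) := by
  unfold patternchaser
  have hfd : PySem.Int.floordiv (PySem.Str.len s) 2 = ((s.toList.length / 2 : Nat) : Int) := by
    rw [PySem.Str.len_eq]
    exact_mod_cast PySem.Int.floordiv_natCast s.toList.length 2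
  rw [hfd, PySem.Str.len_eq, Int.toNat_natCast]
  have hHn : s.toList.length / 2 ≤ s.toList.length := Nat.div_le_self _ _
  by_cases hH : 2 ≤ s.toList.length / 2
  · have hO := outerA s ((s.toList.length + 2) ^ 2) (s.toList.length / 2) 0 hH (le_refl _) (by omega) (by
      unfold Bnd
      have h1 : (s.toList.length / 2 - 1) * (s.toList.length / 2 + 2) ≤ s.toList.length * (s.toList.length + 2) :=
        Nat.mul_le_mul (by omega) (by omega)
      have h2 : (s.toList.length + 2) ^ 2 = s.toList.length * (s.toList.length + 2) + 2 * (s.toList.length + 2) := by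
        ring
      set K1 := (s.toList.length / 2 - 1) * (s.toList.length / 2 + 2) with hK1
      set K2 := s.toList.length * (s.toList.length + 2) with hK2
      omega)
    rw [Nat.cast_zero] at hO
    rw [show (((s.toList.length / 2 : Nat) : Int) - ((s.toList.length / 2 : Nat) : Int) + 1) = 1 from by omega,
        show ((0 : Int) + ((s.toList.length / 2 : Nat) : Int) - 1) = ((s.toList.length / 2 : Nat) : Int) - 1 from by omega,
        ← allPairs_unfold _ _ hH] at hO
    exact hO
  · obtain ⟨f, hf⟩ : ∃ f, (s.toList.length + 2) ^ 2 = f + 1 :=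
      ⟨(s.toList.length + 2) ^ 2 - 1, by
        set K := (s.toList.length + 2) ^ 2 with hK
        have : 0 < K := by positivity
        omega⟩
    rw [hf, pcOuterA, if_neg (by omega)]
    have : s.toList.length / 2 = 0 ∨ s.toList.length / 2 = 1 := by omega
    rcases this with h | h <;> rw [h] <;> rfl

lemma buildB (t : List Char) (L : Nat) :
    ∀ (k : Nat) (q : List Char) (m : Nat), 1 ≤ m →
      ((m : Int) ≤ (((List.range k).foldl (fun d j => d.insert ((t.drop j).take L) (j : Int)) PySem.Dict.empty).getD q (-1))
        ↔ ∃ j, j < k ∧ m ≤ j ∧ (t.drop j).take L = q) := by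
  intro k
  induction k with
  | zero =>
    intro q m hm
    simp [PySem.Dict.getD_empty]
    omega
  | succ k ih =>
    intro q m hm
    rw [List.range_succ, List.foldl_append, List.foldl_cons, List.foldl_nil]
    rw [PySem.Dict.getD_insert]
    by_cases he : q = (t.drop k).take L
    · rw [if_pos he]
      constructor
      · intro h
        exact ⟨k, by omega, by exact_mod_cast h, he.symm⟩
      · rintro ⟨j, h1, h2, h3⟩
        have : j ≤ k := by omega
        exact_mod_cast (by omega : (m : Int) ≤ (k : Int))
    · rw [if_neg he]
      rw [ih q m hm]
      constructor
      · rintro ⟨j, h1, h2, h3⟩; exact ⟨j, by omega, h2, h3⟩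
      · rintro ⟨j, h1, h2, h3⟩
        refine ⟨j, ?_, h2, h3⟩
        rcases Nat.lt_or_ge j k with h | h
        · exact h
        · exfalso
          have : j = k := by omega
          subst this
          exact he h3.symm

lemma scanTest (t : List Char) (L i : Nat) (hL : 2 ≤ L) (hLn : L ≤ t.length) :
    (decide ((i : Int) + L ≤ (bBuild t t.length L).getD ((t.drop i).take L) (-1))) = pGood t L i := by
  apply decide_eq_decide.mpr
  unfold bBuild
  rw [show ((i : Int) + L) = ((i + L : Nat) : Int) from by omega]
  rw [buildB t L (t.length - L + 1) _ (i + L) (by omega)]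
  unfold pKey
  constructor
  · rintro ⟨j, h1, h2, h3⟩
    exact ⟨j, by omega, h2, by omega, h3⟩
  · rintro ⟨j, h1, h2, h3, h4⟩
    exact ⟨j, by omega, h2, h4⟩
lemma loopB (t : List Char) :
    ∀ l : Nat, l + 1 ≤ t.length / 2 →
      bLoop t t.length (l + 1) = specRes t (allPairs (t.length / 2) (l + 1)) := by
  intro l
  induction l with
  | zero => intro _; rfl
  | succ l ih =>
    intro h
    have hHn : t.length / 2 ≤ t.length := Nat.div_le_self _ _
    show bLoop t t.length (l + 2) = _
    rw [bLoop]
    unfold bScan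
    rw [show (fun i : Nat => decide ((i : Int) + ((l + 2 : Nat) : Int) ≤ (bBuild t t.length (l + 2)).getD ((t.drop i).take (l + 2)) (-1)))
          = fun i : Nat => pGood t (l + 2) i from funext fun i => scanTest t (l + 2) i (by omega) (by omega)]
    show _ = specRes t (rows' (t.length / 2) (l + 2) 0 ++ allPairs (t.length / 2) (l + 1))
    unfold specRes rows'
    rw [List.find?_append, List.find?_map, Nat.sub_zero, ← List.range_eq_range']
    simp only [Function.comp_def]
    cases hsc : List.find? (fun i => pGood t (l + 2) i) (List.range (t.length / 2 - (l + 2) + 1)) with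
    | none =>
      simp only [Option.map_none, Option.none_or]
      show bLoop t t.length (l + 1) = _
      exact ih (by omega)
    | some i =>
      rfl

lemma topB (s : String) :
    patternchaser_alt s = specRes s.toList (allPairs (s.toList.length / 2) (s.toList.length / 2)) := by
  unfold patternchaser_alt
  cases hH : s.toList.length / 2 with
  | zero => rfl
  | succ h =>
    have hl := loopB s.toList h (by omega)
    rw [hH] at hl
    exact hl

-- ===== VERDICT (by name: the statement is the Claim_ definition above) =====
theorem patternchaser_spec : Claim_equal_patternchaser := by
  intro s _
  unfold Spec_patternchaser
  rw [topA, topB]
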